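-- pv_equiv track=rewrite | github.com/sureshdevrari/jarwis-agent | services/mobile_service.py | _calculate_severity_counts
-- ===== SOURCE A (Python) =====
-- from typing import Optional, Dict, Any, List
--
-- def _calculate_severity_counts(findings: List[Dict]) -> Dict[str, int]:
--     """Calculate finding counts by severity"""
--     return {
--         "critical": len([f for f in findings if f.get("severity") == "critical"]),
--         "high": len([f for f in findings if f.get("severity") == "high"]),
--         "medium": len([f for f in findings if f.get("severity") == "medium"]),
--         "low": len([f for f in findings if f.get("severity") == "low"]),
--         "info": len([f for f in findings if f.get("severity") == "info"]),
--     }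
-- ===== SOURCE B (Python) =====
-- from typing import Dict, List
--
-- def _calculate_severity_counts(findings: List[Dict]) -> Dict[str, int]:
--     """Calculate finding counts by severity (single pass)."""
--     counts = {"critical": 0, "high": 0, "medium": 0, "low": 0, "info": 0}
--     for f in findings:
--         sev = f.get("severity")
--         if sev in counts:
--             counts[sev] += 1
--     return counts
-- ===== Notes on version B (the rewrite author's own statement) =====
-- stated objective: simpler
-- what changed: Replaces five separate full scans of findings (one list comprehension per severity) with a single pass that maintains a counter dict over the five fixed keys.
import Mathlib
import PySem

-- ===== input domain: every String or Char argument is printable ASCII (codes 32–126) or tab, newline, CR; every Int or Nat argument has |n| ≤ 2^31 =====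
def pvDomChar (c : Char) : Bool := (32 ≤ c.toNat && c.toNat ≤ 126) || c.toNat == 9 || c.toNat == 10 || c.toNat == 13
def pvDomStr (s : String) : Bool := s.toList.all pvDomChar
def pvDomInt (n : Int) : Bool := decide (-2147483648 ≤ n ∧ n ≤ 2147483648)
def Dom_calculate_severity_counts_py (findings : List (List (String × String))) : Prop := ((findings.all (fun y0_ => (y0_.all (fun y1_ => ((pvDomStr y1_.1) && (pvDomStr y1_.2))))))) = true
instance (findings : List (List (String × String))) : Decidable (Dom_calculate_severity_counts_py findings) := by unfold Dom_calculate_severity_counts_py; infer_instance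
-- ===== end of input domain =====

-- B replaces A's five full scans (one per severity) with a single counting pass over the findings; objective: simpler (one counting loop instead of five comprehensions).

-- ===== PORT A =====
-- f.get("severity") on the dict f
def pvSevGet (f : List (String × String)) : Option String := (PySem.Dict.mk f).get? "severity"

def calculate_severity_counts_py (findings : List (List (String × String))) : List (String × Int) :=
  [("critical", ((findings.filter (fun f => pvSevGet f == some "critical")).length : Int)),
   ("high",     ((findings.filter (fun f => pvSevGet f == some "high")).length : Int)),
   ("medium",   ((findings.filter (fun f => pvSevGet f == some "medium")).length : Int)),
   ("low",      ((findings.filter (fun f => pvSevGet f == some "low")).length : Int)),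
   ("info",     ((findings.filter (fun f => pvSevGet f == some "info")).length : Int))]

-- ===== PORT B =====
-- one pass: counts dict with the five fixed keys; 'sev in counts' guards the increment
def calculate_severity_counts_py_alt (findings : List (List (String × String))) : List (String × Int) :=
  (findings.foldl
    (fun counts f =>
      match pvSevGet f with
      | some sev => if counts.contains sev then counts.modify sev 0 (· + 1) else counts
      | none => counts)
    (PySem.Dict.mk [("critical", 0), ("high", 0), ("medium", 0), ("low", 0), ("info", 0)])).items

-- ===== PRECONDITION & SPEC =====
def Spec_calculate_severity_counts_py (findings : List (List (String × String))) (out : List (String × Int)) : Prop := out = calculate_severity_counts_py_alt findings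
instance (findings : List (List (String × String))) (out : List (String × Int)) : Decidable (Spec_calculate_severity_counts_py findings out) := by unfold Spec_calculate_severity_counts_py; infer_instance

-- ===== CLAIM (what is proved, stated in full; the proofs are below) =====
def Claim_equal_calculate_severity_counts_py : Prop := ∀ (findings : List (List (String × String))), Dom_calculate_severity_counts_py findings → Spec_calculate_severity_counts_py findings (calculate_severity_counts_py findings)

-- ===== LEMMAS AND PROOFS =====

-- invariant: folding B's step over a five-key counter dict adds, per key, the number of findings with that severity
theorem pv_fold_invariant (findings : List (List (String × String))) (c h m l i : Int) :
    findings.foldl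
      (fun counts f =>
        match pvSevGet f with
        | some sev => if counts.contains sev then counts.modify sev 0 (· + 1) else counts
        | none => counts)
      (PySem.Dict.mk [("critical", c), ("high", h), ("medium", m), ("low", l), ("info", i)])
    = PySem.Dict.mk
        [("critical", c + ((findings.filter (fun f => pvSevGet f == some "critical")).length : Int)),
         ("high",     h + ((findings.filter (fun f => pvSevGet f == some "high")).length : Int)),
         ("medium",   m + ((findings.filter (fun f => pvSevGet f == some "medium")).length : Int)),
         ("low",      l + ((findings.filter (fun f => pvSevGet f == some "low")).length : Int)),
         ("info",     i + ((findings.filter (fun f => pvSevGet f == some "info")).length : Int))] := by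
  induction findings generalizing c h m l i with
  | nil => simp
  | cons f fs ih =>
    cases hs : pvSevGet f with
    | none => simp only [List.foldl_cons, List.filter_cons, hs]; simp [ih]
    | some sev =>
      simp only [List.foldl_cons, List.filter_cons, hs]
      by_cases h1 : sev = "critical"
      · subst h1
        simp only [show (PySem.Dict.mk [("critical", c), ("high", h), ("medium", m), ("low", l), ("info", i)]).contains "critical" = true from rfl, if_true,
          show (PySem.Dict.mk [("critical", c), ("high", h), ("medium", m), ("low", l), ("info", i)]).modify "critical" 0 (· + 1) = PySem.Dict.mk [("critical", c + 1), ("high", h), ("medium", m), ("low", l), ("info", i)] from by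
            simp [PySem.Dict.modify, PySem.Dict.getD, PySem.Dict.get?, PySem.Dict.insert, PySem.Dict.contains]]
        rw [ih]; simp; ring_nf
      · by_cases h2 : sev = "high"
        · subst h2
          simp only [show (PySem.Dict.mk [("critical", c), ("high", h), ("medium", m), ("low", l), ("info", i)]).contains "high" = true from rfl, if_true,
            show (PySem.Dict.mk [("critical", c), ("high", h), ("medium", m), ("low", l), ("info", i)]).modify "high" 0 (· + 1) = PySem.Dict.mk [("critical", c), ("high", h + 1), ("medium", m), ("low", l), ("info", i)] from by
              simp [PySem.Dict.modify, PySem.Dict.getD, PySem.Dict.get?, PySem.Dict.insert, PySem.Dict.contains]]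
          rw [ih]; simp; ring_nf
        · by_cases h3 : sev = "medium"
          · subst h3
            simp only [show (PySem.Dict.mk [("critical", c), ("high", h), ("medium", m), ("low", l), ("info", i)]).contains "medium" = true from rfl, if_true,
              show (PySem.Dict.mk [("critical", c), ("high", h), ("medium", m), ("low", l), ("info", i)]).modify "medium" 0 (· + 1) = PySem.Dict.mk [("critical", c), ("high", h), ("medium", m + 1), ("low", l), ("info", i)] from by
                simp [PySem.Dict.modify, PySem.Dict.getD, PySem.Dict.get?, PySem.Dict.insert, PySem.Dict.contains]]
            rw [ih]; simp; ring_nf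
          · by_cases h4 : sev = "low"
            · subst h4
              simp only [show (PySem.Dict.mk [("critical", c), ("high", h), ("medium", m), ("low", l), ("info", i)]).contains "low" = true from rfl, if_true,
                show (PySem.Dict.mk [("critical", c), ("high", h), ("medium", m), ("low", l), ("info", i)]).modify "low" 0 (· + 1) = PySem.Dict.mk [("critical", c), ("high", h), ("medium", m), ("low", l + 1), ("info", i)] from by
                  simp [PySem.Dict.modify, PySem.Dict.getD, PySem.Dict.get?, PySem.Dict.insert, PySem.Dict.contains]]
              rw [ih]; simp; ring_nf
            · by_cases h5 : sev = "info"
              · subst h5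
                simp only [show (PySem.Dict.mk [("critical", c), ("high", h), ("medium", m), ("low", l), ("info", i)]).contains "info" = true from rfl, if_true,
                  show (PySem.Dict.mk [("critical", c), ("high", h), ("medium", m), ("low", l), ("info", i)]).modify "info" 0 (· + 1) = PySem.Dict.mk [("critical", c), ("high", h), ("medium", m), ("low", l), ("info", i + 1)] from by
                    simp [PySem.Dict.modify, PySem.Dict.getD, PySem.Dict.get?, PySem.Dict.insert, PySem.Dict.contains]]
                rw [ih]; simp; ring_nf
              · rw [show (PySem.Dict.mk [("critical", c), ("high", h), ("medium", m), ("low", l), ("info", i)]).contains sev = false from by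
                    simp [PySem.Dict.contains, h1, h2, h3, h4, h5, Ne.symm]]
                simp only [if_false, Bool.false_eq_true]
                rw [ih]; simp [h1, h2, h3, h4, h5]

theorem calculate_severity_counts_py_spec : Claim_equal_calculate_severity_counts_py := by
  intro findings _
  unfold Spec_calculate_severity_counts_py calculate_severity_counts_py calculate_severity_counts_py_alt
  rw [pv_fold_invariant]
  simp
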